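-- pv_equiv track=rewrite | github.com/jorendorff/advent-of-code | ad2019/10/part1.py | trace_line_of_sight
-- ===== SOURCE A (Python) =====
-- def point_is_in_range(size, p):
--     w, h = size
--     x, y = p
--     return 0 <= x < w and 0 <= y < h
--
-- def trace_line_of_sight(size, p, dp):
--     x, y = p
--     dx, dy = dp
--     x += dx
--     y += dy
--     while point_is_in_range(size, (x, y)):
--         yield x, y
--         x += dx
--         y += dy
-- ===== SOURCE B (Python) =====
-- def trace_line_of_sight(size, p, dp):
--     w, h = size
--     x, y = p
--     dx, dy = dp
--     if not (0 <= x + dx < w and 0 <= y + dy < h):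
--         return
--     cands = []
--     if dx > 0:
--         cands.append((w - 1 - x) // dx)
--     elif dx < 0:
--         cands.append(x // (-dx))
--     if dy > 0:
--         cands.append((h - 1 - y) // dy)
--     elif dy < 0:
--         cands.append(y // (-dy))
--     k = min(cands)
--     for i in range(1, k + 1):
--         yield (x + i * dx, y + i * dy)
-- ===== Notes on version B (the rewrite author's own statement) =====
-- stated objective: alternative
-- what changed: B replaces A's step-by-step while loop (advance one step, test bounds, yield) by a closed-form count: it computes per-axis the number of in-bounds steps with one floor division, takes the minimum k across the nonzero axes, and emits the k points directly with a flat range loop.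
import Mathlib
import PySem

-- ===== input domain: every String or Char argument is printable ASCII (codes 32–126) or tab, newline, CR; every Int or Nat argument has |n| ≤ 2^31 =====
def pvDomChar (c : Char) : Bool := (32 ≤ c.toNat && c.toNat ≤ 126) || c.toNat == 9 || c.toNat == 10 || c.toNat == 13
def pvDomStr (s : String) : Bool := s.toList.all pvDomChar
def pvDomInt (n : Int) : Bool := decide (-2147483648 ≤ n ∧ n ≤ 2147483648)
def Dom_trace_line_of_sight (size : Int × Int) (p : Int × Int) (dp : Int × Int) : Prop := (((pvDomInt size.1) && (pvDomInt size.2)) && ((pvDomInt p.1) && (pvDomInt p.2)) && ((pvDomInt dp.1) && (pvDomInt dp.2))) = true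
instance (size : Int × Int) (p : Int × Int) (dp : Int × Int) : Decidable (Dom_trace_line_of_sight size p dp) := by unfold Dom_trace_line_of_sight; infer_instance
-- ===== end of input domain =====

-- B replaces A's step-by-step while loop by a closed-form count k of in-bounds steps
-- (per-axis floor divisions, minimum across axes) and emits the k points directly; objective: alternative decomposition.
-- A is a Python generator; the equivalence is about the list of yielded values.

-- ===== PORT A =====
def point_is_in_range (size : Int × Int) (p : Int × Int) : Bool :=
  decide (0 ≤ p.1 ∧ p.1 < size.1) && decide (0 ≤ p.2 ∧ p.2 < size.2)

-- the while loop, with a fuel bound that only makes it total: under Pre_ the loop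
-- performs at most (w+h)+1 iterations (proved below), so the fuel is never exhausted
def traceAux (size : Int × Int) (dx dy : Int) : Nat → Int → Int → List (Int × Int)
  | 0, _, _ => []
  | n+1, x, y =>
    if point_is_in_range size (x, y) then
      (x, y) :: traceAux size dx dy n (x + dx) (y + dy)
    else []

def trace_line_of_sight (size : Int × Int) (p : Int × Int) (dp : Int × Int) : List (Int × Int) :=
  traceAux size dp.1 dp.2 ((size.1 + size.2).toNat + 1) (p.1 + dp.1) (p.2 + dp.2)

-- ===== PORT B =====
def trace_line_of_sight_alt (size : Int × Int) (p : Int × Int) (dp : Int × Int) : List (Int × Int) :=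
  if ¬ (0 ≤ p.1 + dp.1 ∧ p.1 + dp.1 < size.1 ∧ 0 ≤ p.2 + dp.2 ∧ p.2 + dp.2 < size.2) then []
  else
    match PySem.List.min?
      ((if 0 < dp.1 then [PySem.Int.floordiv (size.1 - 1 - p.1) dp.1]
        else if dp.1 < 0 then [PySem.Int.floordiv p.1 (-dp.1)] else []) ++
       (if 0 < dp.2 then [PySem.Int.floordiv (size.2 - 1 - p.2) dp.2]
        else if dp.2 < 0 then [PySem.Int.floordiv p.2 (-dp.2)] else []))
      (fun v => v) with
    | none => []  -- Python's min([]) raises ValueError here; this input is outside Pre_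
    | some k => (PySem.List.pyRange 1 (k + 1) 1).map (fun i => (p.1 + i * dp.1, p.2 + i * dp.2))

-- ===== PRECONDITION & SPEC =====
-- Pre_ excludes only dp = (0,0) with p inside the grid, where A's while loop never
-- terminates (the generator diverges when consumed); B raises ValueError there.
def Pre_trace_line_of_sight (size : Int × Int) (p : Int × Int) (dp : Int × Int) : Prop :=
  ¬ (dp.1 = 0 ∧ dp.2 = 0 ∧ 0 ≤ p.1 ∧ p.1 < size.1 ∧ 0 ≤ p.2 ∧ p.2 < size.2)
instance (size : Int × Int) (p : Int × Int) (dp : Int × Int) : Decidable (Pre_trace_line_of_sight size p dp) := by unfold Pre_trace_line_of_sight; infer_instance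

def pvWitness_trace_line_of_sight : (Int × Int) × (Int × Int) × (Int × Int) := ((5, 5), (0, 0), (1, 1))

def Spec_trace_line_of_sight (size : Int × Int) (p : Int × Int) (dp : Int × Int) (out : List (Int × Int)) : Prop := out = trace_line_of_sight_alt size p dp
instance (size : Int × Int) (p : Int × Int) (dp : Int × Int) (out : List (Int × Int)) : Decidable (Spec_trace_line_of_sight size p dp out) := by unfold Spec_trace_line_of_sight; infer_instance

-- ===== CLAIM (what is proved, stated in full; the proofs are below) =====
def Claim_equal_trace_line_of_sight : Prop := ∀ (size : Int × Int) (p : Int × Int) (dp : Int × Int), Dom_trace_line_of_sight size p dp → Pre_trace_line_of_sight size p dp → Spec_trace_line_of_sight size p dp (trace_line_of_sight size p dp)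

-- ===== LEMMAS AND PROOFS =====

-- per-axis condition "coordinate after i steps is in [0, w)"
def AxOK (w d x0 i : Int) : Prop := 0 ≤ x0 + i * d ∧ x0 + i * d < w

lemma axOK_pos {w d x0 : Int} (hd : 0 < d) (h1 : AxOK w d x0 1) :
    ∀ i : Int, 1 ≤ i → (AxOK w d x0 i ↔ i ≤ PySem.Int.floordiv (w - 1 - x0) d) := by
  intro i hi
  rw [PySem.Int.le_floordiv_iff_mul_le hd]
  unfold AxOK at *
  constructor
  · intro h; nlinarith [h.2]
  · intro h
    constructor
    · nlinarith [h1.1, mul_nonneg (by omega : (0:Int) ≤ i - 1) (le_of_lt hd)]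
    · nlinarith

lemma axOK_neg {w d x0 : Int} (hd : d < 0) (h1 : AxOK w d x0 1) :
    ∀ i : Int, 1 ≤ i → (AxOK w d x0 i ↔ i ≤ PySem.Int.floordiv x0 (-d)) := by
  intro i hi
  rw [PySem.Int.le_floordiv_iff_mul_le (by omega : (0:Int) < -d)]
  unfold AxOK at *
  constructor
  · intro h; nlinarith [h.1]
  · intro h
    constructor
    · nlinarith
    · nlinarith [h1.2, mul_nonneg (by omega : (0:Int) ≤ i - 1) (by omega : (0:Int) ≤ -d)]

lemma axOK_zero {w d x0 : Int} (hd : d = 0) (h1 : AxOK w d x0 1) :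
    ∀ i : Int, AxOK w d x0 i := by
  intro i; unfold AxOK at *; subst hd; simpa using h1

-- a nonzero axis bounds the step count by the grid dimension
lemma axOK_bound {w d x0 k : Int} (hd : d ≠ 0) (h1 : AxOK w d x0 1) (hk : AxOK w d x0 k)
    (hk1 : 1 ≤ k) : k ≤ w := by
  unfold AxOK at *
  rcases lt_or_gt_of_ne hd with hneg | hpos
  · nlinarith [h1.2, hk.1, mul_nonneg (by omega : (0:Int) ≤ k - 1) (by omega : (0:Int) ≤ -d)]
  · nlinarith [h1.1, hk.2, mul_nonneg (by omega : (0:Int) ≤ k - 1) (le_of_lt hpos)]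

lemma pir_iff (w h dx dy px py i : Int) :
    point_is_in_range (w, h) (px + i * dx, py + i * dy) = true ↔
      AxOK w dx px i ∧ AxOK h dy py i := by
  simp [point_is_in_range, AxOK]

-- the while loop, given enough fuel, yields exactly steps i .. k
lemma traceAux_eq (w h dx dy px py k : Int)
    (hk1 : ∀ i : Int, 1 ≤ i → i ≤ k → point_is_in_range (w, h) (px + i * dx, py + i * dy) = true)
    (hk2 : point_is_in_range (w, h) (px + (k + 1) * dx, py + (k + 1) * dy) = false) :
    ∀ (n : Nat) (i : Int), 1 ≤ i → i ≤ k + 1 → k + 1 - i ≤ (n : Int) →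
      traceAux (w, h) dx dy n (px + i * dx) (py + i * dy) =
        (PySem.List.pyRange i (k + 1) 1).map (fun j => (px + j * dx, py + j * dy)) := by
  intro n
  induction n with
  | zero =>
    intro i hi1 hi2 hn
    have : i = k + 1 := by omega
    subst this
    simp [traceAux, PySem.List.pyRange_one_eq_nil le_rfl]
  | succ m ih =>
    intro i hi1 hi2 hn
    by_cases hik : i ≤ k
    · rw [traceAux, if_pos (hk1 i hi1 hik), PySem.List.pyRange_one_cons (by omega)]
      have hx : px + i * dx + dx = px + (i + 1) * dx := by ring
      have hy : py + i * dy + dy = py + (i + 1) * dy := by ring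
      rw [hx, hy, ih (i + 1) (by omega) (by omega) (by omega)]
      simp
    · have : i = k + 1 := by omega
      subst this
      rw [traceAux, if_neg (by simp [hk2]), PySem.List.pyRange_one_eq_nil le_rfl]
      simp

-- min? of the two-sided candidate list
lemma min?_single (a : Int) : PySem.List.min? [a] (fun v => v) = some a := by
  simp [PySem.List.min?]

lemma min?_pair (a b : Int) : PySem.List.min? [a, b] (fun v => v) = some (min a b) := by
  rw [PySem.List.min?_id_cons]
  simp

-- the core: the fueled while loop equals the k-step emission, given the interval characterisation
lemma core (w h px py dx dy k : Int)
    (hiff : ∀ i : Int, 1 ≤ i → ((AxOK w dx px i ∧ AxOK h dy py i) ↔ i ≤ k))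
    (hd : dx ≠ 0 ∨ dy ≠ 0)
    (hfx : AxOK w dx px 1) (hfy : AxOK h dy py 1) :
    traceAux (w, h) dx dy ((w + h).toNat + 1) (px + dx) (py + dy) =
      (PySem.List.pyRange 1 (k + 1) 1).map (fun i => (px + i * dx, py + i * dy)) := by
  have hk1 : 1 ≤ k := (hiff 1 le_rfl).mp ⟨hfx, hfy⟩
  have hatk : AxOK w dx px k ∧ AxOK h dy py k := (hiff k hk1).mpr le_rfl
  have hw1 : 1 ≤ w := by have := hfx; unfold AxOK at this; omega
  have hh1 : 1 ≤ h := by have := hfy; unfold AxOK at this; omega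
  have hkb : k ≤ w + h - 1 := by
    rcases hd with hdx | hdy
    · have := axOK_bound hdx hfx hatk.1 hk1; omega
    · have := axOK_bound hdy hfy hatk.2 hk1; omega
  have hk1' : ∀ i : Int, 1 ≤ i → i ≤ k →
      point_is_in_range (w, h) (px + i * dx, py + i * dy) = true := by
    intro i h1 h2; rw [pir_iff]; exact (hiff i h1).mpr h2
  have hk2' : point_is_in_range (w, h) (px + (k + 1) * dx, py + (k + 1) * dy) = false := by
    by_contra hc
    rw [Bool.not_eq_false, pir_iff] at hc
    have := (hiff (k + 1) (by omega)).mp hc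
    omega
  have htn : ((w + h).toNat : Int) = w + h := Int.toNat_of_nonneg (by omega)
  have hn : k + 1 - 1 ≤ (((w + h).toNat + 1 : Nat) : Int) := by push_cast [htn]; omega
  have := traceAux_eq w h dx dy px py k hk1' hk2' ((w + h).toNat + 1) 1 le_rfl (by omega) hn
  simpa using this

-- ===== VERDICT (by name: the statement is the Claim_ definition above) =====
theorem trace_line_of_sight_spec : Claim_equal_trace_line_of_sight := by
  unfold Claim_equal_trace_line_of_sight
  rintro ⟨w, h⟩ ⟨px, py⟩ ⟨dx, dy⟩ _ hpre
  simp only [Pre_trace_line_of_sight] at hpre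
  simp only [Spec_trace_line_of_sight, trace_line_of_sight, trace_line_of_sight_alt]
  by_cases hfirst : 0 ≤ px + dx ∧ px + dx < w ∧ 0 ≤ py + dy ∧ py + dy < h
  · rw [if_neg (not_not_intro hfirst)]
    obtain ⟨hx0, hxw, hy0, hyh⟩ := hfirst
    have hfx : AxOK w dx px 1 := by unfold AxOK; omega
    have hfy : AxOK h dy py 1 := by unfold AxOK; omega
    rcases lt_trichotomy dx 0 with hdx | hdx | hdx <;>
      rcases lt_trichotomy dy 0 with hdy | hdy | hdy
    -- dx<0, dy<0
    · rw [if_neg (by omega), if_pos hdx, if_neg (by omega), if_pos hdy,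
        List.singleton_append, min?_pair]
      exact core w h px py dx dy _
        (fun i hi => by
          rw [le_min_iff, axOK_neg hdx hfx i hi, axOK_neg hdy hfy i hi])
        (Or.inl (by omega)) hfx hfy
    -- dx<0, dy=0
    · rw [if_neg (by omega), if_pos hdx, if_neg (by omega), if_neg (by omega),
        List.append_nil, min?_single]
      refine core w h px py dx dy _ (fun i hi => ?_) (Or.inl (by omega)) hfx hfy
      constructor
      · rintro ⟨ha, _⟩; exact (axOK_neg hdx hfx i hi).mp ha
      · intro hle; exact ⟨(axOK_neg hdx hfx i hi).mpr hle, axOK_zero hdy hfy i⟩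
    -- dx<0, dy>0
    · rw [if_neg (by omega), if_pos hdx, if_pos hdy, List.singleton_append, min?_pair]
      exact core w h px py dx dy _
        (fun i hi => by
          rw [le_min_iff, axOK_neg hdx hfx i hi, axOK_pos hdy hfy i hi])
        (Or.inl (by omega)) hfx hfy
    -- dx=0, dy<0
    · rw [if_neg (by omega), if_neg (by omega), if_neg (by omega), if_pos hdy,
        List.nil_append, min?_single]
      refine core w h px py dx dy _ (fun i hi => ?_) (Or.inr (by omega)) hfx hfy
      constructor
      · rintro ⟨_, hb⟩; exact (axOK_neg hdy hfy i hi).mp hb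
      · intro hle; exact ⟨axOK_zero hdx hfx i, (axOK_neg hdy hfy i hi).mpr hle⟩
    -- dx=0, dy=0: excluded by Pre_
    · exact absurd ⟨hdx, hdy, by omega, by omega, by omega, by omega⟩ hpre
    -- dx=0, dy>0
    · rw [if_neg (by omega), if_neg (by omega), if_pos hdy, List.nil_append, min?_single]
      refine core w h px py dx dy _ (fun i hi => ?_) (Or.inr (by omega)) hfx hfy
      constructor
      · rintro ⟨_, hb⟩; exact (axOK_pos hdy hfy i hi).mp hb
      · intro hle; exact ⟨axOK_zero hdx hfx i, (axOK_pos hdy hfy i hi).mpr hle⟩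
    -- dx>0, dy<0
    · rw [if_pos hdx, if_neg (by omega), if_pos hdy, List.singleton_append, min?_pair]
      exact core w h px py dx dy _
        (fun i hi => by
          rw [le_min_iff, axOK_pos hdx hfx i hi, axOK_neg hdy hfy i hi])
        (Or.inl (by omega)) hfx hfy
    -- dx>0, dy=0
    · rw [if_pos hdx, if_neg (by omega), if_neg (by omega), List.append_nil, min?_single]
      refine core w h px py dx dy _ (fun i hi => ?_) (Or.inl (by omega)) hfx hfy
      constructor
      · rintro ⟨ha, _⟩; exact (axOK_pos hdx hfx i hi).mp ha
      · intro hle; exact ⟨(axOK_pos hdx hfx i hi).mpr hle, axOK_zero hdy hfy i⟩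
    -- dx>0, dy>0
    · rw [if_pos hdx, if_pos hdy, List.singleton_append, min?_pair]
      exact core w h px py dx dy _
        (fun i hi => by
          rw [le_min_iff, axOK_pos hdx hfx i hi, axOK_pos hdy hfy i hi])
        (Or.inl (by omega)) hfx hfy
  · rw [if_pos hfirst]
    have hpir : point_is_in_range (w, h) (px + dx, py + dy) = false := by
      simp only [point_is_in_range]
      simp only [Bool.and_eq_false_iff, decide_eq_false_iff_not]
      omega
    simp [traceAux, hpir]
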